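-- pv_equiv track=rewrite | github.com/tschai-yim/ttihp-mill | test/test.py | is_cyclic_match
-- ===== SOURCE A (Python) =====
-- def is_cyclic_match(observed, expected):
--     if expected == 0: return observed == 0
--     if expected == 0xFFFF: return observed == 0xFFFF
--
--     # Check all 16 cyclic shifts
--     for i in range(16):
--         shifted = ((expected << i) | (expected >> (16 - i))) & 0xFFFF
--         if observed == shifted:
--             return True
--     return False
-- ===== SOURCE B (Python) =====
-- def is_cyclic_match(observed, expected):
--     # A 16-bit pattern matches some cyclic shift of `expected` iff its binary
--     # string occurs in the (31-char) binary string of expected doubled into 32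
--     # bits: the classic "rotation <=> substring of s+s" trick.
--     if observed < 0 or observed > 0xFFFF:
--         return False
--     doubled = (expected | (expected << 16)) & 0xFFFFFFFF
--     return format(observed, '016b') in format(doubled, '032b')[:31]
-- ===== Notes on version B (the rewrite author's own statement) =====
-- stated objective: alternative
-- what changed: A loops over 16 rotation candidates built by shift/or/mask and returns on the first hit (plus two special-case early returns); B has no rotation loop at all: it renders observed as a 16-char binary string and the 32-bit doubled word (expected | expected<<16) as a 32-char binary string, and answers by substring containment in its first 31 characters (the classic 'rotation iff substring of s+s' reduction).
import Mathlib
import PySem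

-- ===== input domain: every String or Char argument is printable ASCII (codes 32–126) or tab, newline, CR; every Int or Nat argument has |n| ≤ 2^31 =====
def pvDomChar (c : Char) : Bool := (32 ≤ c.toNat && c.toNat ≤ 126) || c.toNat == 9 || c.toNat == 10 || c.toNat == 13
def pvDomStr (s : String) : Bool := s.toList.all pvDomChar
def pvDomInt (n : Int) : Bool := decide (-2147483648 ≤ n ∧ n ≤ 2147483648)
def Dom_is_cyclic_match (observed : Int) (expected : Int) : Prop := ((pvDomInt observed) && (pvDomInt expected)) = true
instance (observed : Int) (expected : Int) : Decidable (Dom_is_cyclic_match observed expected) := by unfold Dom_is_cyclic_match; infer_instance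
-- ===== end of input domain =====

-- B replaces A's loop over 16 rotate-and-compare candidates by the classic string
-- reduction: render both values in binary and test substring containment in the
-- doubled word (objective: alternative).

-- ===== PORT A =====
-- the `for i in range(16)` loop with its early `return True`
def icmLoop (observed : Int) (expected : Int) : List Int → Bool
  | [] => false
  | i :: rest =>
      let shifted := PySem.Int.band
        (PySem.Int.bor (expected <<< i.toNat) (expected >>> (16 - i).toNat)) 65535
      if observed = shifted then true else icmLoop observed expected rest

def is_cyclic_match (observed : Int) (expected : Int) : Bool :=
  if expected = 0 then decide (observed = 0)
  else if expected = 65535 then decide (observed = 65535)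
  else icmLoop observed expected (PySem.List.pyRange 0 16 1)

-- ===== PORT B =====
-- format(n, '0wb') ported by hand: w binary digit characters, MSB first; exact
-- because both of Source B's format calls receive 0 ≤ n < 2^w (no sign, no overflow).
def fmtB : Nat → Nat → List Char
  | 0, _ => []
  | w + 1, n => fmtB w (n >>> 1) ++ [if n % 2 == 1 then '1' else '0']

-- Python's substring test `pat in hay`, ported by hand: true iff pat is a prefix
-- of some suffix of hay (exact substring semantics, incl. the empty pattern).
def strContains : List Char → List Char → Bool
  | [], pat => pat.isEmpty
  | hay@(_ :: t), pat => pat.isPrefixOf hay || strContains t pat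

def is_cyclic_match_alt (observed : Int) (expected : Int) : Bool :=
  if observed < 0 ∨ 65535 < observed then false
  else
    let doubled := PySem.Int.band (PySem.Int.bor expected (expected <<< (16 : Nat))) 4294967295
    strContains ((fmtB 32 doubled.toNat).take 31) (fmtB 16 observed.toNat)

-- ===== PRECONDITION & SPEC =====
def Spec_is_cyclic_match (observed : Int) (expected : Int) (out : Bool) : Prop := out = is_cyclic_match_alt observed expected
instance (observed : Int) (expected : Int) (out : Bool) : Decidable (Spec_is_cyclic_match observed expected out) := by unfold Spec_is_cyclic_match; infer_instance

-- ===== CLAIM (what is proved, stated in full; the proofs are below) =====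
def Claim_equal_is_cyclic_match : Prop := ∀ (observed : Int) (expected : Int), Dom_is_cyclic_match observed expected → Spec_is_cyclic_match observed expected (is_cyclic_match observed expected)

-- ===== LEMMAS AND PROOFS =====

-- proof-side abbreviation: the (nonnegative) doubled word both reductions go through
def Nval (e : Int) : Nat := (PySem.Int.band (PySem.Int.bor e (e <<< (16 : Nat))) 4294967295).toNat

theorem tb_pred_shift (m : Nat) : ∀ (i j : Nat), ((m+1) <<< i - 1).testBit j = (decide (j < i) || m.testBit (j - i)) := by
  intro i
  induction i with
  | zero => intro j; simp
  | succ i ih =>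
    intro j
    have hpos : 0 < (m+1) <<< i := by simp [Nat.shiftLeft_eq]
    have h2 : (m+1) <<< (i+1) - 1 = 2 * ((m+1) <<< i - 1) + 1 := by
      rw [Nat.shiftLeft_succ]; omega
    rw [h2]
    cases j with
    | zero => simp
    | succ j =>
      rw [show 2 * ((m+1) <<< i - 1) + 1 = Nat.bit true ((m+1) <<< i - 1) from by simp [Nat.bit]]
      rw [Nat.testBit_bit_succ, ih j]
      simp only [Nat.succ_sub_succ]
      by_cases h : j < i <;> simp [h]

theorem mask16 : (65535 : Nat) = 2^16 - 1 := by norm_num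

theorem natRot (m i : Nat) (h : i < 16) :
    (m <<< i ||| m >>> (16 - i)) &&& 65535 = ((m ||| m <<< 16) >>> (16 - i)) &&& 65535 := by
  apply Nat.eq_of_testBit_eq
  intro j
  simp only [Nat.testBit_and, Nat.testBit_or, Nat.testBit_shiftLeft, Nat.testBit_shiftRight,
    mask16, Nat.testBit_two_pow_sub_one]
  by_cases hj : j < 16
  · simp only [hj, decide_true, Bool.and_true]
    by_cases hij : i ≤ j
    · have e1 : (16 - i) + j ≥ 16 := by omega
      have e2 : (16 - i) + j - 16 = j - i := by omega
      simp [hij, e1, e2, Bool.or_comm]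
    · have e1 : ¬ ((16 - i) + j ≥ 16) := by omega
      simp [hij, e1]
  · simp [hj]

theorem natRotNeg (m i : Nat) (h : i < 16) :
    65535 &&& (((m+1) <<< i - 1) &&& (m >>> (16 - i)))
      = 65535 &&& ((m &&& ((m+1) <<< 16 - 1)) >>> (16 - i)) := by
  apply Nat.eq_of_testBit_eq
  intro j
  simp only [Nat.testBit_and, Nat.testBit_shiftRight, tb_pred_shift,
    mask16, Nat.testBit_two_pow_sub_one]
  by_cases hj : j < 16
  · simp only [hj, decide_true, Bool.true_and]
    by_cases hij : j < i
    · have e1 : (16 - i) + j < 16 := by omega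
      simp [hij, e1]
    · have e1 : ¬ ((16 - i) + j < 16) := by omega
      have e2 : (16 - i) + j - 16 = j - i := by omega
      simp only [hij, decide_false, Bool.false_or, e1, e2, Bool.and_comm]
  · simp [hj]

theorem shl_ofNat (m i : Nat) : (Int.ofNat m) <<< i = Int.ofNat (m <<< i) := rfl
theorem c65535 : (65535 : Int) = Int.ofNat 65535 := rfl
theorem c2_32 : (4294967295 : Int) = Int.ofNat 4294967295 := rfl
theorem ofNat_inj' (x y : Nat) (h : x = y) : Int.ofNat x = Int.ofNat y := by rw [h]
theorem shl_negSucc (m i : Nat) : (Int.negSucc m) <<< i = Int.negSucc ((m+1) <<< i - 1) := rfl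
theorem shr_ofNat (m i : Nat) : (Int.ofNat m) >>> i = Int.ofNat (m >>> i) := rfl
theorem shr_negSucc (m i : Nat) : (Int.negSucc m) >>> i = Int.negSucc (m >>> i) := rfl

theorem bor_ofNat (x y : Nat) : PySem.Int.bor (Int.ofNat x) (Int.ofNat y) = Int.ofNat (x ||| y) := by
  simp [PySem.Int.bor]
theorem bor_negSucc (x y : Nat) : PySem.Int.bor (Int.negSucc x) (Int.negSucc y) = Int.negSucc (x &&& y) := by
  have h1 : ¬ (0 ≤ Int.negSucc x) := by omega
  have h2 : ¬ (0 ≤ Int.negSucc y) := by omega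
  simp only [PySem.Int.bor, h1, h2, if_false]
  have e1 : (-Int.negSucc x - 1).toNat = x := by omega
  have e2 : (-Int.negSucc y - 1).toNat = y := by omega
  rw [e1, e2, Int.negSucc_eq]; ring
theorem band_ofNat (x y : Nat) : PySem.Int.band (Int.ofNat x) (Int.ofNat y) = Int.ofNat (x &&& y) := by
  simp [PySem.Int.band]
theorem band_negSucc_ofNat (x y : Nat) : PySem.Int.band (Int.negSucc x) (Int.ofNat y) = Int.ofNat (y - (y &&& x)) := by
  have h1 : ¬ (0 ≤ Int.negSucc x) := by omega
  have h2 : (0 ≤ Int.ofNat y) := Int.natCast_nonneg y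
  simp only [PySem.Int.band, h1, h2, if_false, if_true]
  have e1 : (-Int.negSucc x - 1).toNat = x := by omega
  have e2 : (Int.ofNat y).toNat = y := rfl
  rw [e1, e2]; rfl

-- the key per-shift identity: A's i-th rotation candidate is a window of the doubled word
theorem rotWindow (e : Int) (i : Nat) (h : i < 16) :
    PySem.Int.band (PySem.Int.bor (e <<< i) (e >>> (16 - i))) 65535
      = PySem.Int.band ((PySem.Int.bor e (e <<< (16 : Nat))) >>> (16 - i)) 65535 := by
  cases e with
  | ofNat m =>
    simp only [c65535, shl_ofNat, shr_ofNat, bor_ofNat, band_ofNat]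
    exact ofNat_inj' _ _ (natRot m i h)
  | negSucc m =>
    simp only [c65535, shl_negSucc, shr_negSucc, bor_negSucc, band_negSucc_ofNat]
    exact ofNat_inj' _ _ (by rw [natRotNeg m i h])

theorem maskRange (z : Int) : 0 ≤ PySem.Int.band z 65535 ∧ PySem.Int.band z 65535 < 65536 := by
  cases z with
  | ofNat m =>
    rw [c65535, band_ofNat]
    have h2 : m &&& 65535 ≤ 65535 := Nat.and_le_right
    simp only [Int.ofNat_eq_natCast]
    omega
  | negSucc m =>
    rw [c65535, band_negSucc_ofNat]
    simp only [Int.ofNat_eq_natCast]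
    omega

theorem loop_false (o e : Int) (ho : ¬(0 ≤ o ∧ o < 65536)) : ∀ l, icmLoop o e l = false := by
  intro l
  induction l with
  | nil => rfl
  | cons i rest ih =>
    simp only [icmLoop]
    rw [if_neg, ih]
    intro hEq
    have := maskRange (PySem.Int.bor (e <<< i.toNat) (e >>> (16 - i).toNat))
    omega

-- testBit of the w-bit complement shape `2^w - 1 - x % 2^w`
theorem maskT (w x j : Nat) : (2^w - 1 - x % 2^w).testBit j = (decide (j < w) && !x.testBit j) := by
  have h1 : (2^w - 1 - x % 2^w) = (~~~(BitVec.ofNat w x)).toNat := by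
    rw [BitVec.toNat_not, BitVec.toNat_ofNat]
  rw [h1, BitVec.testBit_toNat, BitVec.getLsbD_not, BitVec.getLsbD_ofNat]
  by_cases h : j < w <;> simp [h]

theorem g1 (m s : Nat) (hs : s ≤ 16) :
    (m >>> s) &&& 65535 = ((m &&& 4294967295) >>> s) % 65536 := by
  have e16 : (65535 : Nat) = 2^16 - 1 := by norm_num
  have e32 : (4294967295 : Nat) = 2^32 - 1 := by norm_num
  have e2 : (65536 : Nat) = 2^16 := by norm_num
  rw [e16, e32, e2]
  apply Nat.eq_of_testBit_eq
  intro j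
  simp only [Nat.testBit_and, Nat.testBit_shiftRight, Nat.testBit_mod_two_pow,
    Nat.testBit_two_pow_sub_one]
  by_cases hj : j < 16
  · have h32 : s + j < 32 := by omega
    simp [hj, h32]
  · simp [hj]

theorem g2 (m s : Nat) (hs : s ≤ 16) :
    65535 - (65535 &&& (m >>> s)) = ((4294967295 - (4294967295 &&& m)) >>> s) % 65536 := by
  have e16 : (65535 : Nat) = 2^16 - 1 := by norm_num
  have e32 : (4294967295 : Nat) = 2^32 - 1 := by norm_num
  have e2 : (65536 : Nat) = 2^16 := by norm_num
  rw [e16, e32, e2, Nat.and_comm (2^16 - 1) (m >>> s), Nat.and_comm (2^32 - 1) m,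
    Nat.and_two_pow_sub_one_eq_mod, Nat.and_two_pow_sub_one_eq_mod]
  apply Nat.eq_of_testBit_eq
  intro j
  simp only [maskT, Nat.testBit_mod_two_pow, Nat.testBit_shiftRight]
  by_cases hj : j < 16
  · have h32 : s + j < 32 := by omega
    simp [hj, h32]
  · simp [hj]

-- the window of A's doubled word equals the corresponding window of B's 32-bit Nat
theorem winEq (d : Int) (s : Nat) (hs : s ≤ 16) :
    PySem.Int.band (d >>> s) 65535
      = Int.ofNat (((PySem.Int.band d 4294967295).toNat >>> s) % 65536) := by
  cases d with
  | ofNat m =>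
    rw [shr_ofNat, c65535, band_ofNat, c2_32, band_ofNat]
    exact ofNat_inj' _ _ (g1 m s hs)
  | negSucc m =>
    rw [shr_negSucc, c65535, band_negSucc_ofNat, c2_32, band_negSucc_ofNat]
    rw [show (Int.ofNat (4294967295 - (4294967295 &&& m))).toNat
        = 4294967295 - (4294967295 &&& m) from rfl]
    exact ofNat_inj' _ _ (g2 m s hs)

theorem fmtB_length (w n : Nat) : (fmtB w n).length = w := by
  induction w generalizing n with
  | zero => rfl
  | succ w ih => simp [fmtB, ih]

theorem fmtB_split (b a n : Nat) : fmtB (a + b) n = fmtB a (n >>> b) ++ fmtB b n := by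
  induction b generalizing n with
  | zero => simp [fmtB]
  | succ b ih =>
    show fmtB ((a + b) + 1) n = _
    rw [fmtB, ih (n >>> 1), fmtB]
    rw [show n >>> 1 >>> b = n >>> (b + 1) from by
      rw [← Nat.shiftRight_add]; ring_nf]
    simp

theorem fmtB_inj (w : Nat) : ∀ (x y : Nat), fmtB w x = fmtB w y ↔ x % 2^w = y % 2^w := by
  induction w with
  | zero => intro x y; simp [fmtB, Nat.mod_one]
  | succ w ih =>
    intro x y
    have hp : (2:Nat)^(w+1) = 2 * 2^w := by ring
    have hxm : x % (2 * 2^w) = x % 2 + 2 * (x / 2 % 2^w) := Nat.mod_mul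
    have hym : y % (2 * 2^w) = y % 2 + 2 * (y / 2 % 2^w) := Nat.mod_mul
    constructor
    · intro h
      simp only [fmtB] at h
      obtain ⟨h1, h2⟩ := List.append_inj h (by rw [fmtB_length, fmtB_length])
      have hq : x >>> 1 % 2^w = y >>> 1 % 2^w := (ih _ _).mp h1
      rw [Nat.shiftRight_one, Nat.shiftRight_one] at hq
      have hb : x % 2 = y % 2 := by
        rcases Nat.mod_two_eq_zero_or_one x with hx2 | hx2 <;>
          rcases Nat.mod_two_eq_zero_or_one y with hy2 | hy2 <;>
          simp only [hx2, hy2] at h2 ⊢ <;> simp at h2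
      rw [hp, hxm, hym]
      omega
    · intro h
      rw [hp, hxm, hym] at h
      have hb : x % 2 = y % 2 := by omega
      have hq : x / 2 % 2^w = y / 2 % 2^w := by omega
      simp only [fmtB, Nat.shiftRight_one]
      rw [(ih (x / 2) (y / 2)).mpr hq, hb]

theorem win_take (n k : Nat) (hk : k ≤ 16) :
    List.take 16 (List.drop k (fmtB 32 n)) = fmtB 16 (n >>> (16 - k)) := by
  have hA : List.drop k (fmtB 32 n) = fmtB (32 - k) n := by
    conv_lhs => rw [show (32:Nat) = k + (32 - k) from by omega, fmtB_split]
    exact List.drop_left' (fmtB_length _ _)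
  have hB : List.take 16 (fmtB (32 - k) n) = fmtB 16 (n >>> (16 - k)) := by
    conv_lhs => rw [show 32 - k = 16 + (16 - k) from by omega, fmtB_split]
    exact List.take_left' (fmtB_length _ _)
  rw [hA, hB]

theorem strContains_iff (pat : List Char) : ∀ (hay : List Char),
    strContains hay pat = true ↔ ∃ k, pat <+: hay.drop k := by
  intro hay
  induction hay with
  | nil =>
    simp only [strContains, List.drop_nil, List.isEmpty_iff, List.prefix_nil]
    exact ⟨fun h => ⟨0, h⟩, fun ⟨_, h⟩ => h⟩
  | cons a t ih =>
    simp only [strContains, Bool.or_eq_true, List.isPrefixOf_iff_prefix, ih]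
    constructor
    · rintro (h | ⟨k, hk⟩)
      · exact ⟨0, by simpa⟩
      · exact ⟨k + 1, by simpa [List.drop_succ_cons]⟩
    · rintro ⟨k, hk⟩
      cases k with
      | zero => exact Or.inl (by simpa using hk)
      | succ k => exact Or.inr ⟨k, by simpa [List.drop_succ_cons] using hk⟩

theorem contains_windows (n t : Nat) (ht : t < 65536) :
    strContains ((fmtB 32 n).take 31) (fmtB 16 t) = true
      ↔ ∃ k, k < 16 ∧ t = (n >>> (16 - k)) % 65536 := by
  have p16 : (2:Nat)^16 = 65536 := by norm_num
  rw [strContains_iff]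
  constructor
  · rintro ⟨k, hk⟩
    rw [List.drop_take] at hk
    rcases List.prefix_take_iff.mp hk with ⟨hpre, hlen⟩
    rw [fmtB_length] at hlen
    have hk16 : k < 16 := by omega
    refine ⟨k, hk16, ?_⟩
    have heq := List.prefix_iff_eq_take.mp hpre
    rw [fmtB_length, win_take n k (le_of_lt hk16)] at heq
    have hmod := (fmtB_inj 16 t (n >>> (16 - k))).mp heq
    rw [p16, Nat.mod_eq_of_lt ht] at hmod
    exact hmod
  · rintro ⟨k, hk, ht'⟩
    refine ⟨k, ?_⟩
    rw [List.drop_take]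
    refine List.prefix_take_iff.mpr ⟨?_, by rw [fmtB_length]; omega⟩
    rw [List.prefix_iff_eq_take, fmtB_length, win_take n k (le_of_lt hk)]
    refine (fmtB_inj 16 t (n >>> (16 - k))).mpr ?_
    rw [p16]
    omega

theorem icmLoop_any (o e : Int) : ∀ l, icmLoop o e l
    = l.any fun i => decide (o = PySem.Int.band
        (PySem.Int.bor (e <<< i.toNat) (e >>> (16 - i).toNat)) 65535) := by
  intro l
  induction l with
  | nil => rfl
  | cons i rest ih =>
    simp only [icmLoop, List.any_cons]
    by_cases h : o = PySem.Int.band (PySem.Int.bor (e <<< i.toNat) (e >>> (16 - i).toNat)) 65535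
    · simp [h]
    · simp [h, ih]

theorem a_in_range (o e : Int) (h0 : 0 ≤ o) (h1 : o ≤ 65535) :
    (is_cyclic_match o e = true) ↔ ∃ k, k < 16 ∧ o.toNat = (Nval e >>> (16 - k)) % 65536 := by
  rw [is_cyclic_match]
  by_cases he0 : e = 0
  · subst he0
    rw [if_pos rfl]
    have hNv : Nval 0 = 0 := by decide
    simp only [hNv, Nat.zero_shiftRight, Nat.zero_mod, decide_eq_true_eq]
    constructor
    · intro h; exact ⟨0, by norm_num, by omega⟩
    · rintro ⟨k, _, hk⟩; omega
  · by_cases he1 : e = 65535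
    · subst he1
      rw [if_neg (by norm_num), if_pos rfl]
      have hNv : Nval 65535 = 4294967295 := by decide
      have hw : ∀ k, k < 16 → ((4294967295:Nat) >>> (16 - k)) % 65536 = 65535 := by
        intro k hk; interval_cases k <;> decide
      rw [hNv]
      simp only [decide_eq_true_eq]
      constructor
      · intro h; exact ⟨0, by norm_num, by rw [hw 0 (by norm_num)]; omega⟩
      · rintro ⟨k, hk, hv⟩; rw [hw k hk] at hv; omega
    · rw [if_neg he0, if_neg he1, icmLoop_any, List.any_eq_true]
      constructor
      · rintro ⟨i, hmem, hi⟩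
        rw [PySem.List.mem_pyRange_one] at hmem
        have hk : i.toNat < 16 := by omega
        have hsub : (16 - i).toNat = 16 - i.toNat := by omega
        rw [hsub, rotWindow e i.toNat hk, winEq _ _ (show 16 - i.toNat ≤ 16 by omega),
          decide_eq_true_eq, Int.ofNat_eq_natCast] at hi
        refine ⟨i.toNat, hk, ?_⟩
        unfold Nval
        omega
      · rintro ⟨k, hk, hv⟩
        refine ⟨(k : Int), PySem.List.mem_pyRange_one.mpr ⟨by omega, by exact_mod_cast hk⟩, ?_⟩
        have h2 : ((k : Int)).toNat = k := Int.toNat_natCast k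
        have hsub : ((16:Int) - (k : Int)).toNat = 16 - k := by omega
        rw [h2, hsub, rotWindow e k hk, winEq _ _ (show 16 - k ≤ 16 by omega),
          decide_eq_true_eq, Int.ofNat_eq_natCast]
        unfold Nval at hv
        omega

theorem alt_in_range (o e : Int) (hg : ¬(o < 0 ∨ 65535 < o)) :
    (is_cyclic_match_alt o e = true) ↔ ∃ k, k < 16 ∧ o.toNat = (Nval e >>> (16 - k)) % 65536 := by
  have hB : is_cyclic_match_alt o e
      = strContains ((fmtB 32 (Nval e)).take 31) (fmtB 16 o.toNat) := by
    rw [is_cyclic_match_alt, if_neg hg]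
    rfl
  rw [hB]
  exact contains_windows (Nval e) o.toNat (by omega)

theorem icm_agree (o e : Int) : is_cyclic_match o e = is_cyclic_match_alt o e := by
  by_cases hg : o < 0 ∨ 65535 < o
  · have halt : is_cyclic_match_alt o e = false := by rw [is_cyclic_match_alt, if_pos hg]
    rw [halt, is_cyclic_match]
    by_cases he0 : e = 0
    · subst he0
      rw [if_pos rfl]
      have : o ≠ 0 := by omega
      simp [this]
    · by_cases he1 : e = 65535
      · subst he1
        rw [if_neg (by norm_num), if_pos rfl]
        have : o ≠ 65535 := by omega
        simp [this]
      · rw [if_neg he0, if_neg he1]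
        exact loop_false o e (by omega) _
  · rw [Bool.eq_iff_iff, a_in_range o e (by omega) (by omega), alt_in_range o e hg]

-- ===== VERDICT (by name: the statement is the Claim_ definition above) =====
theorem is_cyclic_match_spec : Claim_equal_is_cyclic_match := by
  intro observed expected _
  unfold Spec_is_cyclic_match
  exact icm_agree observed expected
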